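-- pv_equiv track=rewrite | github.com/qqweqwqweqwe/todoapp | 프로그래머스/단계2/가장큰수.py | bignum
-- ===== SOURCE A (Python) =====
-- def bignum(num1,num2):
--   num1=str(num1)
--   num2=str(num2)
--   while len(num1)!=len(num2):
--     if len(num1)>len(num2):
--       num2+=num2[-1]
--     else:
--       num1+=num1[-1]
--   if num1>=num2:
--     return -1
--   else:
--     return 1
-- ===== SOURCE B (Python) =====
-- def bignum(num1, num2):
--     s1 = str(num1)
--     s2 = str(num2)
--     m = max(len(s1), len(s2))
--     for i in range(m):
--         c1 = s1[i] if i < len(s1) else s1[-1]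
--         c2 = s2[i] if i < len(s2) else s2[-1]
--         if c1 > c2:
--             return -1
--         if c1 < c2:
--             return 1
--     return -1
-- ===== Notes on version B (the rewrite author's own statement) =====
-- stated objective: alternative
-- what changed: B replaces A's pad-the-shorter-string-in-a-loop-then-compare decomposition by a single index scan up to max(len) that clamps each string to its last character on the fly, returning at the first differing position without building any padded strings.
import Mathlib
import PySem

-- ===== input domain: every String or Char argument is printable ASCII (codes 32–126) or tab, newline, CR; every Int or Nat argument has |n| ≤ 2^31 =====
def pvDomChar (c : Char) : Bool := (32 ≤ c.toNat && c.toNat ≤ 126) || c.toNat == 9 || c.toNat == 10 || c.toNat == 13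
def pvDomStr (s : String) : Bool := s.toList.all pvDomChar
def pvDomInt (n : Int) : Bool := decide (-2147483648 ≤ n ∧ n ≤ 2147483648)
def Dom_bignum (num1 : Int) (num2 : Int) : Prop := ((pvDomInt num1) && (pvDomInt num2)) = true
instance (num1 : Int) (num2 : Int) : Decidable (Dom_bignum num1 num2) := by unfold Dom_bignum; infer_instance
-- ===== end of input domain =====

-- B avoids A's pad-the-shorter-string loop: one clamped index scan, no padded strings built.

-- ===== PORT A =====
-- the 'while len(num1)!=len(num2)' loop; num*[-1] is exact via getLastD because str(int)
-- is never empty, so the IndexError branch of Python's s[-1] is unreachable here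
def bignumPad (n1 n2 : List Char) : List Char × List Char :=
  if n1.length = n2.length then (n1, n2)
  else if n1.length > n2.length then bignumPad n1 (n2 ++ [n2.getLastD ' '])
  else bignumPad (n1 ++ [n1.getLastD ' ']) n2
termination_by ((n1.length : Int) - n2.length).natAbs
decreasing_by all_goals simp; omega

def bignum (num1 : Int) (num2 : Int) : Int :=
  let n1 := PySem.Int.toChars num1
  let n2 := PySem.Int.toChars num2
  let p := bignumPad n1 n2
  -- Python 'num1 >= num2' on str is ¬ (num1 < num2), code-point lexicographic
  if ¬ (p.1 < p.2) then -1 else 1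

-- ===== PORT B =====
-- 'for i in range(m)' with early return; c1/c2 are the clamped characters of Source B
def bignumScan (s1 s2 : List Char) (m i : Nat) : Int :=
  if i < m then
    let c1 := if i < s1.length then s1.getD i ' ' else s1.getLastD ' '
    let c2 := if i < s2.length then s2.getD i ' ' else s2.getLastD ' '
    if c2 < c1 then -1
    else if c1 < c2 then 1
    else bignumScan s1 s2 m (i + 1)
  else -1
termination_by m - i

def bignum_alt (num1 : Int) (num2 : Int) : Int :=
  let s1 := PySem.Int.toChars num1
  let s2 := PySem.Int.toChars num2
  bignumScan s1 s2 (max s1.length s2.length) 0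

-- ===== PRECONDITION & SPEC =====
def Spec_bignum (num1 : Int) (num2 : Int) (out : Int) : Prop := out = bignum_alt num1 num2
instance (num1 : Int) (num2 : Int) (out : Int) : Decidable (Spec_bignum num1 num2 out) := by unfold Spec_bignum; infer_instance

-- ===== CLAIM (what is proved, stated in full; the proofs are below) =====
def Claim_equal_bignum : Prop := ∀ (num1 : Int) (num2 : Int), Dom_bignum num1 num2 → Spec_bignum num1 num2 (bignum num1 num2)

-- ===== LEMMAS AND PROOFS =====

/-- What A's padding loop computes, in closed form. -/
def padTo (s : List Char) (m : Nat) : List Char :=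
  s ++ List.replicate (m - s.length) (s.getLastD ' ')

theorem length_padTo (s : List Char) (m : Nat) (hm : s.length ≤ m) :
    (padTo s m).length = m := by
  simp [padTo]; omega

theorem getLastD_append_singleton (s : List Char) (c d : Char) :
    (s ++ [c]).getLastD d = c := by
  induction s with
  | nil => rfl
  | cons a as ih => simp [List.getLastD]

theorem padTo_append_last (s : List Char) (m : Nat) (h : s.length < m) :
    padTo (s ++ [s.getLastD ' ']) m = padTo s m := by
  simp only [padTo, getLastD_append_singleton, List.length_append, List.length_singleton,
    List.append_assoc, List.singleton_append]
  rw [← List.replicate_succ]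
  have hk : m - (s.length + 1) + 1 = m - s.length := by omega
  rw [hk]

theorem bignumPad_eq (n1 n2 : List Char) :
    bignumPad n1 n2 =
      (padTo n1 (max n1.length n2.length), padTo n2 (max n1.length n2.length)) := by
  fun_induction bignumPad n1 n2 with
  | case1 n1 n2 h =>
    simp [padTo, h]
  | case2 n1 n2 h h2 ih =>
    rw [ih]
    have hm : max n1.length (n2 ++ [n2.getLastD ' ']).length = max n1.length n2.length := by
      simp; omega
    rw [hm, padTo_append_last n2 _ (by omega)]
  | case3 n1 n2 h h2 ih =>
    rw [ih]
    have hm : max (n1 ++ [n1.getLastD ' ']).length n2.length = max n1.length n2.length := by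
      simp; omega
    rw [hm, padTo_append_last n1 _ (by omega)]

theorem padTo_getElem (s : List Char) (m i : Nat) (hi : i < m)
    (h : i < (padTo s m).length) :
    (padTo s m)[i] = if h' : i < s.length then s[i] else s.getLastD ' ' := by
  by_cases h' : i < s.length
  · simp [padTo, h', List.getElem_append_left]
  · have hrep : i - s.length < m - s.length := by omega
    simp [padTo, h', List.getElem_append_right (by omega : s.length ≤ i)]

theorem drop_lt_nil (l : List Char) : ¬ ((l : List Char) < ([] : List Char)) := by
  intro hc
  cases hc

/-- The clamped character Source B reads at position `i` is the padded string's character there. -/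
theorem clamp_eq (s : List Char) (m i : Nat) (_hm : s.length ≤ m) (hi : i < m)
    (h : i < (padTo s m).length) :
    (if i < s.length then s.getD i ' ' else s.getLastD ' ') = (padTo s m)[i] := by
  rw [padTo_getElem s m i hi]
  split_ifs with h'
  · exact List.getD_eq_getElem s ' ' h'
  · rfl

/-- The scan from index `i` decides the lexicographic order of the dropped padded strings. -/
theorem bignumScan_eq_padTo (s1 s2 : List Char) (m i : Nat)
    (hm1 : s1.length ≤ m) (hm2 : s2.length ≤ m) (hi : i ≤ m) :
    bignumScan s1 s2 m i =
      if (padTo s1 m).drop i < (padTo s2 m).drop i then 1 else -1 := by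
  have L1 := length_padTo s1 m hm1
  have L2 := length_padTo s2 m hm2
  fun_induction bignumScan s1 s2 m i with
  | case1 i hlt c1 c2 hgt =>
    simp only [c1, c2, dite_eq_ite] at hgt
    -- c2 < c1 : the scan returns -1, and the padded suffixes are not <
    rw [List.drop_eq_getElem_cons (show i < (padTo s1 m).length by omega),
        List.drop_eq_getElem_cons (show i < (padTo s2 m).length by omega), if_neg]
    intro hc
    rcases List.cons_lt_cons_iff.mp hc with hlt' | ⟨he, _⟩
    · rw [← clamp_eq s1 m i hm1 hlt (by omega), ← clamp_eq s2 m i hm2 hlt (by omega)] at hlt'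
      exact absurd (lt_trans hlt' hgt) (lt_irrefl _)
    · rw [← clamp_eq s1 m i hm1 hlt (by omega), ← clamp_eq s2 m i hm2 hlt (by omega)] at he
      rw [← he] at hgt
      exact absurd hc (by rw [List.cons_lt_cons_iff]; rintro (h | ⟨h, _⟩) <;> simp_all)
  | case2 i hlt c1 c2 hgt hlt2 =>
    simp only [c1, c2, dite_eq_ite] at hgt hlt2
    -- c1 < c2 : the scan returns 1, and the padded suffixes are <
    rw [List.drop_eq_getElem_cons (show i < (padTo s1 m).length by omega),
        List.drop_eq_getElem_cons (show i < (padTo s2 m).length by omega), if_pos]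
    refine List.cons_lt_cons_iff.mpr (Or.inl ?_)
    rw [← clamp_eq s1 m i hm1 hlt (by omega), ← clamp_eq s2 m i hm2 hlt (by omega)]
    exact hlt2
  | case3 i hlt c1 c2 hgt hlt2 ih =>
    simp only [c1, c2, dite_eq_ite] at hgt hlt2
    -- equal characters: both sides reduce to the next index
    rw [ih (by omega)]
    have he : (padTo s1 m)[i]'(by omega) = (padTo s2 m)[i]'(by omega) := by
      rw [← clamp_eq s1 m i hm1 hlt (by omega), ← clamp_eq s2 m i hm2 hlt (by omega)]
      exact le_antisymm (le_of_not_gt hgt) (le_of_not_gt hlt2)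
    rw [List.drop_eq_getElem_cons (show i < (padTo s1 m).length by omega),
        List.drop_eq_getElem_cons (show i < (padTo s2 m).length by omega), he]
    by_cases hd : (padTo s1 m).drop (i + 1) < (padTo s2 m).drop (i + 1)
    · rw [if_pos hd, if_pos (List.cons_lt_cons_iff.mpr (Or.inr ⟨rfl, hd⟩))]
    · rw [if_neg hd, if_neg]
      intro hc
      rcases List.cons_lt_cons_iff.mp hc with h | ⟨_, h⟩
      · exact lt_irrefl _ h
      · exact hd h
  | case4 i hnlt =>
    -- i = m : both padded suffixes are empty and [] < [] is false
    rw [List.drop_of_length_le (by omega), List.drop_of_length_le (by omega),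
        if_neg (drop_lt_nil [])]

-- ===== VERDICT (by name: the statement is the Claim_ definition above) =====
theorem bignum_spec : Claim_equal_bignum := by
  intro num1 num2 _
  unfold Spec_bignum
  show bignum num1 num2 = bignum_alt num1 num2
  simp only [bignum, bignum_alt]
  set s1 := PySem.Int.toChars num1 with hs1
  set s2 := PySem.Int.toChars num2 with hs2
  rw [bignumPad_eq, bignumScan_eq_padTo s1 s2 (max s1.length s2.length) 0
    (Nat.le_max_left _ _) (Nat.le_max_right _ _) (Nat.zero_le _)]
  simp only [List.drop_zero]
  split_ifs with h1 <;> simp_all
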